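-- pv_equiv track=rewrite | github.com/sujitchavda01/OmniPrompt | src/refine/refine_pipeline.py | _collect_requirements
-- ===== SOURCE A (Python) =====
-- from typing import List, Tuple
--
-- def _collect_requirements(sentences: List[str]) -> List[str]:
--     # Heuristic: sentences with modal verbs or leading bullets
--     req_markers = ["must", "should", "need to", "required", "support", "allow", "enable"]
--     results: List[str] = []
--     for s in sentences:
--         s_l = s.lower()
--         if any(m in s_l for m in req_markers):
--             results.append(s)
--     return results
-- ===== SOURCE B (Python) =====
-- def _collect_requirements(sentences):
--     # Single left-to-right scan of each sentence: at every position try all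
--     # markers with startswith, instead of one full substring search per marker.
--     req_markers = ("must", "should", "need to", "required", "support", "allow", "enable")
--
--     def has_marker(s):
--         t = s.lower()
--         for i in range(len(t)):
--             for m in req_markers:
--                 if t.startswith(m, i):
--                     return True
--         return False
--
--     return [s for s in sentences if has_marker(s)]
-- ===== Notes on version B (the rewrite author's own statement) =====
-- stated objective: alternative
-- what changed: A runs one whole-string substring search per marker per sentence; B makes a single left-to-right position scan per sentence, testing all markers by startswith at each position, and builds the result as one filter comprehension instead of an accumulator loop.
import Mathlib
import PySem

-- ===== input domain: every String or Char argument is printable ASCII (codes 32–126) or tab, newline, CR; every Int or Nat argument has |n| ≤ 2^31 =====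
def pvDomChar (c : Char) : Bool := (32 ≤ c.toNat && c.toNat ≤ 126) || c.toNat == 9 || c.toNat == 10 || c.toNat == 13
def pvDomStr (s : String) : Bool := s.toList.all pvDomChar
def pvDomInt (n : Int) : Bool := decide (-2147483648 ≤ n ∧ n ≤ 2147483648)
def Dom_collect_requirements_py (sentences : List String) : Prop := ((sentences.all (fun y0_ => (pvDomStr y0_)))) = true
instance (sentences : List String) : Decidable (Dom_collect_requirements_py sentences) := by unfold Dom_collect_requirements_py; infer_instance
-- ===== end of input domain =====

-- B replaces A's per-marker whole-string substring searches with one left-to-right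
-- position scan per sentence (startswith at each index) and a filter comprehension;
-- alternative structure, same results.


-- ===== PORT A =====
def collect_requirements_py (sentences : List String) : List String :=
  let req_markers : List String := ["must", "should", "need to", "required", "support", "allow", "enable"]
  sentences.foldl (fun results s =>
    let s_l := PySem.Str.lower s
    if req_markers.any (fun m => PySem.Str.isIn m s_l) then results ++ [s] else results) []

-- ===== PORT B =====
def pvMarkers : List String := ["must", "should", "need to", "required", "support", "allow", "enable"]

-- t.startswith(m, i) with 0 ≤ i ≤ len(t) is exactly "m.toList is a prefix of t.drop i"
def pvHasMarker (s : String) : Bool :=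
  let t := (PySem.Str.lower s).toList
  (List.range t.length).any (fun i =>
    pvMarkers.any (fun m => PySem.Chars.startswith (t.drop i) m.toList))

def collect_requirements_py_alt (sentences : List String) : List String :=
  sentences.filter pvHasMarker

-- ===== PRECONDITION & SPEC =====
def Spec_collect_requirements_py (sentences : List String) (out : List String) : Prop := out = collect_requirements_py_alt sentences
instance (sentences : List String) (out : List String) : Decidable (Spec_collect_requirements_py sentences out) := by unfold Spec_collect_requirements_py; infer_instance

-- ===== CLAIM (what is proved, stated in full; the proofs are below) =====
def Claim_equal_collect_requirements_py : Prop := ∀ (sentences : List String), Dom_collect_requirements_py sentences → Spec_collect_requirements_py sentences (collect_requirements_py sentences)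

-- ===== LEMMAS AND PROOFS =====

-- A's per-sentence test (any marker a substring of the lowercase sentence) agrees with
-- B's per-sentence test (some position where some marker starts).
lemma hasMarker_eq (s : String) :
    (["must", "should", "need to", "required", "support", "allow", "enable"] : List String).any
      (fun m => PySem.Str.isIn m (PySem.Str.lower s)) = pvHasMarker s := by
  unfold pvHasMarker
  rw [Bool.eq_iff_iff]
  simp only [List.any_eq_true, List.mem_range, PySem.Str.isIn_eq, PySem.Chars.startswith_iff]
  constructor
  · rintro ⟨m, hm, hin⟩
    obtain ⟨j, hj⟩ := (PySem.Chars.exists_prefix_drop_iff_isIn _ _).mpr hin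
    have h1 : 1 ≤ m.toList.length := by fin_cases hm <;> decide
    have h2 := hj.length_le
    rw [List.length_drop] at h2
    exact ⟨j, by omega, m, by simpa [pvMarkers] using hm, hj⟩
  · rintro ⟨i, _, m, hm, hpre⟩
    refine ⟨m, by simpa [pvMarkers] using hm, ?_⟩
    exact (PySem.Chars.exists_prefix_drop_iff_isIn _ _).mp ⟨i, hpre⟩

-- ===== VERDICT (by name: the statement is the Claim_ definition above) =====
theorem collect_requirements_py_spec : Claim_equal_collect_requirements_py := by
  intro sentences _
  unfold Spec_collect_requirements_py collect_requirements_py collect_requirements_py_alt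
  simp only []
  rw [PySem.List.foldl_append_if_eq_filter]
  rw [List.nil_append]
  exact (List.filter_congr (fun s _ => hasMarker_eq s))
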